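-- pv_equiv track=rewrite | github.com/Kotolanchik/algorithms-and-data-structures | module-2/task-1.py | pop_first_even
-- ===== SOURCE A (Python) =====
-- def pop_first_even(array):
--     stack = []
--
--     for el in array:
--         if el % 2 == 0:
--             stack.append(el)
--
--     if not stack:
--         return -1
--
--     return stack[-1]
-- ===== SOURCE B (Python) =====
-- def pop_first_even(array):
--     for i in range(len(array) - 1, -1, -1):
--         if array[i] % 2 == 0:
--             return array[i]
--     return -1
-- ===== Notes on version B (the rewrite author's own statement) =====
-- stated objective: simpler
-- what changed: B scans the array backwards by index and returns the first even element it meets (early exit, no accumulator list), instead of collecting every even element in a list and returning its last entry.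
import Mathlib
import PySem

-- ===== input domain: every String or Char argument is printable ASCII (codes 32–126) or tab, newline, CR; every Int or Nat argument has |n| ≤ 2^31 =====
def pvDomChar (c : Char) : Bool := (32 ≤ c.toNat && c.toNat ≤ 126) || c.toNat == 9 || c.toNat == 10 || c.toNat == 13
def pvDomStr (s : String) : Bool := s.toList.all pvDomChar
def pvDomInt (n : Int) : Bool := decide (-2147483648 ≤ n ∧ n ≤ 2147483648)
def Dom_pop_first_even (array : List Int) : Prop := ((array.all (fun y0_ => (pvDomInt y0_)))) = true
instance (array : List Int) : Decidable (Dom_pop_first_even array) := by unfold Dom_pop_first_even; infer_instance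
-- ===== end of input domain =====

-- B replaces A's "collect all evens into a list, return its last" by a backwards
-- index scan that returns the first even element found (early exit, no extra list): simpler.

-- ===== PORT A =====
def pop_first_even (array : List Int) : Int :=
  let stack := array.foldl (fun s el => if el % 2 == 0 then s ++ [el] else s) []
  if stack = [] then -1
  else match PySem.List.pyGet? stack (-1) with
       | some v => v
       | none => -1

-- ===== PORT B =====
-- for i in range(len(array)-1, -1, -1): return array[i] on first even; fall through to -1
def pop_first_even_alt_go (array : List Int) : List Int → Int
  | [] => -1
  | i :: rest =>
    match PySem.List.pyGet? array i with
    | some v => if v % 2 == 0 then v else pop_first_even_alt_go array rest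
    | none => pop_first_even_alt_go array rest

def pop_first_even_alt (array : List Int) : Int :=
  pop_first_even_alt_go array (PySem.List.pyRange ((array.length : Int) - 1) (-1) (-1))

-- ===== PRECONDITION & SPEC =====
def Spec_pop_first_even (array : List Int) (out : Int) : Prop := out = pop_first_even_alt array
instance (array : List Int) (out : Int) : Decidable (Spec_pop_first_even array out) := by unfold Spec_pop_first_even; infer_instance

-- ===== CLAIM (what is proved, stated in full; the proofs are below) =====
def Claim_equal_pop_first_even : Prop := ∀ (array : List Int), Dom_pop_first_even array → Spec_pop_first_even array (pop_first_even array)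

-- ===== LEMMAS AND PROOFS =====

theorem pv_getLast?_cons (x v : Int) (t : List Int) (h : t.getLast? = some v) :
    (x :: t).getLast? = some v := by
  cases t with
  | nil => simp at h
  | cons a as => rw [List.getLast?_cons_cons]; exact h

theorem pv_foldl_filter (l acc : List Int) :
    l.foldl (fun s el => if el % 2 == 0 then s ++ [el] else s) acc
      = acc ++ l.filter (fun el => el % 2 == 0) := by
  induction l generalizing acc with
  | nil => simp
  | cons x xs ih =>
    simp only [List.foldl_cons, List.filter_cons]
    by_cases h : (x % 2 == 0) = true
    · rw [if_pos h, if_pos h, ih]; simp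
    · rw [if_neg h, if_neg h, ih]

theorem pv_find?_reverse (l : List Int) :
    l.reverse.find? (fun el => el % 2 == 0)
      = (l.filter (fun el => el % 2 == 0)).getLast? := by
  induction l with
  | nil => simp
  | cons x xs ih =>
    simp only [List.reverse_cons, List.find?_append, List.filter_cons]
    by_cases h : (x % 2 == 0) = true
    · rw [if_pos h]
      cases hf : xs.reverse.find? (fun el => el % 2 == 0) with
      | none =>
        have hnil : (xs.filter (fun el => el % 2 == 0)) = [] := by
          rw [ih] at hf
          cases hxs : xs.filter (fun el => el % 2 == 0) with
          | nil => rfl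
          | cons a as => rw [hxs] at hf; simp at hf
        simp [List.find?, h, hnil]
      | some v =>
        rw [ih] at hf
        rw [pv_getLast?_cons x v _ hf]
        rfl
    · rw [if_neg h]
      have h' : (x % 2 == 0) = false := by simpa using h
      cases hf : xs.reverse.find? (fun el => el % 2 == 0) with
      | none => simp [List.find?, h', ih.symm.trans hf]
      | some v => simp [h', ih.symm.trans hf]

theorem pv_a_char (l : List Int) :
    pop_first_even l = (l.reverse.find? (fun el => el % 2 == 0)).getD (-1) := by
  unfold pop_first_even
  rw [pv_foldl_filter, pv_find?_reverse]
  simp only [List.nil_append]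
  cases hf : l.filter (fun el => el % 2 == 0) with
  | nil => simp
  | cons a as =>
    have hne : (a :: as : List Int) ≠ [] := by simp
    rw [if_neg hne, PySem.List.pyGet?_neg_one]
    cases hg : (a :: as).getLast? with
    | none => simp at hg
    | some v => simp

theorem pv_b_char (l : List Int) (n : Nat) (hn : n ≤ l.length) :
    pop_first_even_alt_go l (PySem.List.pyRange ((n : Int) - 1) (-1) (-1))
      = ((l.take n).reverse.find? (fun el => el % 2 == 0)).getD (-1) := by
  induction n with
  | zero =>
    rw [PySem.List.pyRange_neg_one_eq_nil (by omega)]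
    simp [pop_first_even_alt_go]
  | succ m ih =>
    have hm : m < l.length := by omega
    rw [show ((m + 1 : Nat) : Int) - 1 = (m : Int) by push_cast; ring]
    rw [PySem.List.pyRange_neg_one_cons (by omega)]
    show pop_first_even_alt_go l ((m : Int) :: _) = _
    rw [List.take_add_one]
    have hget : l[m]? = some l[m] := List.getElem?_eq_getElem hm
    simp only [pop_first_even_alt_go, PySem.List.pyGet?_natCast, hget,
      List.reverse_append, Option.toList_some, List.reverse_singleton,
      List.singleton_append, List.find?_cons]
    by_cases h : (l[m] % 2 == 0) = true
    · simp [h]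
    · have h' : (l[m] % 2 == 0) = false := by simpa using h
      rw [h', if_neg (by simp), ih (by omega)]

-- ===== VERDICT (by name: the statement is the Claim_ definition above) =====
theorem pop_first_even_spec : Claim_equal_pop_first_even := by
  intro array _
  unfold Spec_pop_first_even pop_first_even_alt
  rw [pv_a_char]
  rw [show ((array.length : Int) - 1) = ((array.length : Nat) : Int) - 1 from rfl]
  rw [pv_b_char array array.length le_rfl]
  simp
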